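-- pv_equiv track=rewrite | github.com/ibrahimbayyinah/sololearn-codes | python/caesar_cipher_13.py | tdec
-- ===== SOURCE A (Python) =====
-- def tdec(text):
--
--     # Defining a dictionary with the numerical values of each letter
--     numVals = {1:'a', 2:'b', 3:'c',4:'d', 5:'e', 6:'f', 7:'g', 8:'h', 9:'i', 10:'j', 11:'k', 12:'l', 13:'m', 14:'n', 15:'o', 16:'p', 17:'q', 18:'r', 19:'s', 20:'t', 21:'u', 22:'v', 23:'w', 24:'x', 25:'y', 26:'z'}
--
--     # Defining a dictionary with the letters of the alphabet ordered
--     alphabet = {'a':1, 'b':2, 'c':3, 'd':4, 'e':5, 'f':6, 'g':7, 'h':8, 'i':9, 'j':10, 'k':11, 'l':12, 'm':13, 'n':14, 'o':15, 'p':16, 'q':17, 'r':18, 's':19, 't':20, 'u':21, 'v':22, 'w':23, 'x':24, 'y':25, 'z':26}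
--
--     newtext = text.lower() # Changing the text to all lower case letters to make life easier
--
--     msg = "" # Defining an empty string that will eventually be the deciphered message
--
--     # The below code will iterate through each character of the text, concatinate it with the msg string and return msg. Conversion will be done for all the characters that are letters of the alphabet.
--     for char in newtext:
--         if char in alphabet:
--             newValue = numConv(alphabet.get(char))
--             char = numVals.get(newValue)
--         msg += char
--     return msg
--
-- def numConv(num):
--     return num-13 if num>13 else 26+num-13
-- ===== SOURCE B (Python) =====
-- _TABLE = str.maketrans("abcdefghijklmnopqrstuvwxyz", "nopqrstuvwxyzabcdefghijklm")
--
-- def tdec(text):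
--     return text.lower().translate(_TABLE)
-- ===== Notes on version B (the rewrite author's own statement) =====
-- stated objective: idiomatic
-- what changed: Replaced the two 26-entry dictionaries, the per-character loop with string concatenation and the numConv helper by a single precomputed str.maketrans ROT13 table applied via text.lower().translate in one call.
import Mathlib
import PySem

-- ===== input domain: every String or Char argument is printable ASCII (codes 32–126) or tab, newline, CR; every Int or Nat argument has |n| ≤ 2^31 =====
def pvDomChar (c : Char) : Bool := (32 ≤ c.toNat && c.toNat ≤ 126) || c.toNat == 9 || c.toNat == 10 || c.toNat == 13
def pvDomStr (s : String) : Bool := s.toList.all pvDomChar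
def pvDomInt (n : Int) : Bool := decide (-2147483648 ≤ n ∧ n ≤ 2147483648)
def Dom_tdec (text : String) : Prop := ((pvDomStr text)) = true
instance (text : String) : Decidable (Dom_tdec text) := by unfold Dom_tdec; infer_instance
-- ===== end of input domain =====

-- B replaces A's two dictionaries, numConv helper and concatenation loop by one
-- precomputed ROT13 translation table applied char-wise (idiomatic; same O(n) cost).

-- ===== PORT A =====
def numConv (num : Int) : Int := if num > 13 then num - 13 else 26 + num - 13

def pvNumVals : PySem.Dict Int String := PySem.Dict.ofList
  [(1,"a"),(2,"b"),(3,"c"),(4,"d"),(5,"e"),(6,"f"),(7,"g"),(8,"h"),(9,"i"),(10,"j"),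
   (11,"k"),(12,"l"),(13,"m"),(14,"n"),(15,"o"),(16,"p"),(17,"q"),(18,"r"),(19,"s"),
   (20,"t"),(21,"u"),(22,"v"),(23,"w"),(24,"x"),(25,"y"),(26,"z")]

def pvAlphabet : PySem.Dict String Int := PySem.Dict.ofList
  [("a",1),("b",2),("c",3),("d",4),("e",5),("f",6),("g",7),("h",8),("i",9),("j",10),
   ("k",11),("l",12),("m",13),("n",14),("o",15),("p",16),("q",17),("r",18),("s",19),
   ("t",20),("u",21),("v",22),("w",23),("x",24),("y",25),("z",26)]

-- for char in newtext: if char in alphabet: char = numVals.get(numConv(alphabet.get(char))); msg += char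
-- (dict.get of a key the branch proved present: the Option is consumed with getD; defaults unreachable)
def tdec (text : String) : String :=
  let newtext := PySem.Str.lower text
  newtext.toList.foldl
    (fun msg c =>
      let ch := String.ofList [c]
      if pvAlphabet.contains ch then
        msg ++ ((pvNumVals.get? (numConv ((pvAlphabet.get? ch).getD 0))).getD "")
      else
        msg ++ ch)
    ""

-- ===== PORT B =====
-- _TABLE = str.maketrans("abcdefghijklmnopqrstuvwxyz", "nopqrstuvwxyzabcdefghijklm")
def pvRotTable : PySem.Dict Char Char :=
  PySem.Dict.ofList (List.zip "abcdefghijklmnopqrstuvwxyz".toList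
                              "nopqrstuvwxyzabcdefghijklm".toList)

-- return text.lower().translate(_TABLE): one pass, table chars replaced, others kept
def tdec_alt (text : String) : String :=
  String.ofList ((PySem.Str.lower text).toList.map (fun c => (pvRotTable.get? c).getD c))

-- ===== PRECONDITION & SPEC =====
def Spec_tdec (text : String) (out : String) : Prop := out = tdec_alt text
instance (text : String) (out : String) : Decidable (Spec_tdec text out) := by unfold Spec_tdec; infer_instance

-- ===== CLAIM (what is proved, stated in full; the proofs are below) =====
def Claim_equal_tdec : Prop := ∀ (text : String), Dom_tdec text → Spec_tdec text (tdec text)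

-- ===== LEMMAS AND PROOFS =====

-- A's loop body as a function of one character, and B's per-char translation
def pvStepA (c : Char) : String :=
  let ch := String.ofList [c]
  if pvAlphabet.contains ch then
    (pvNumVals.get? (numConv ((pvAlphabet.get? ch).getD 0))).getD ""
  else ch

def pvStepB (c : Char) : Char := (pvRotTable.get? c).getD c

theorem pvBeq_toList (s t : String) : (s == t) = (s.toList == t.toList) := by
  by_cases h : s = t
  · simp [h]
  · have h2 : s.toList ≠ t.toList := fun hh => h (String.toList_inj.mp hh)
    simp [h, h2]

theorem pvStep_eq (c : Char) : pvStepA c = String.ofList [pvStepB c] := by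
  by_cases h : c ∈ (['a','b','c','d','e','f','g','h','i','j','k','l','m',
                     'n','o','p','q','r','s','t','u','v','w','x','y','z'] : List Char)
  · fin_cases h <;> decide
  · simp at h
    obtain ⟨h1,h2,h3,h4,h5,h6,h7,h8,h9,h10,h11,h12,h13,h14,h15,h16,h17,h18,h19,h20,
            h21,h22,h23,h24,h25,h26⟩ := h
    have eA : pvAlphabet = PySem.Dict.mk
      [("a",1),("b",2),("c",3),("d",4),("e",5),("f",6),("g",7),("h",8),("i",9),("j",10),
       ("k",11),("l",12),("m",13),("n",14),("o",15),("p",16),("q",17),("r",18),("s",19),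
       ("t",20),("u",21),("v",22),("w",23),("x",24),("y",25),("z",26)] := by decide
    have eR : pvRotTable = PySem.Dict.mk
      [('a','n'),('b','o'),('c','p'),('d','q'),('e','r'),('f','s'),('g','t'),('h','u'),
       ('i','v'),('j','w'),('k','x'),('l','y'),('m','z'),('n','a'),('o','b'),('p','c'),
       ('q','d'),('r','e'),('s','f'),('t','g'),('u','h'),('v','i'),('w','j'),('x','k'),
       ('y','l'),('z','m')] := by decide
    have hA : pvAlphabet.contains (String.ofList [c]) = false := by
      rw [eA]
      simp [PySem.Dict.contains_mk, pvBeq_toList,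
        Ne.symm h1, Ne.symm h2, Ne.symm h3, Ne.symm h4, Ne.symm h5, Ne.symm h6,
        Ne.symm h7, Ne.symm h8, Ne.symm h9, Ne.symm h10, Ne.symm h11, Ne.symm h12,
        Ne.symm h13, Ne.symm h14, Ne.symm h15, Ne.symm h16, Ne.symm h17, Ne.symm h18,
        Ne.symm h19, Ne.symm h20, Ne.symm h21, Ne.symm h22, Ne.symm h23, Ne.symm h24,
        Ne.symm h25, Ne.symm h26]
    have hR : pvRotTable.get? c = none := by
      rw [eR]
      simp [PySem.Dict.get?,
        Ne.symm h1, Ne.symm h2, Ne.symm h3, Ne.symm h4, Ne.symm h5, Ne.symm h6,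
        Ne.symm h7, Ne.symm h8, Ne.symm h9, Ne.symm h10, Ne.symm h11, Ne.symm h12,
        Ne.symm h13, Ne.symm h14, Ne.symm h15, Ne.symm h16, Ne.symm h17, Ne.symm h18,
        Ne.symm h19, Ne.symm h20, Ne.symm h21, Ne.symm h22, Ne.symm h23, Ne.symm h24,
        Ne.symm h25, Ne.symm h26]
    simp [pvStepA, pvStepB, hA, hR]

theorem pv_fold (l : List Char) (s : String) :
    l.foldl (fun msg c =>
      let ch := String.ofList [c]
      if pvAlphabet.contains ch then
        msg ++ ((pvNumVals.get? (numConv ((pvAlphabet.get? ch).getD 0))).getD "")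
      else msg ++ ch) s
    = s ++ String.ofList (l.map pvStepB) := by
  induction l generalizing s with
  | nil => simp
  | cons c t ih =>
    have hc := pvStep_eq c
    simp only [List.foldl, List.map]
    rw [ih]
    by_cases hmem : pvAlphabet.contains (String.ofList [c])
    · simp only [hmem, if_true]
      have : (pvNumVals.get? (numConv ((pvAlphabet.get? (String.ofList [c])).getD 0))).getD ""
               = String.ofList [pvStepB c] := by
        simpa [pvStepA, hmem] using hc
      rw [this]
      rw [String.append_assoc]
      congr 1
      rw [← String.toList_inj]
      simp
    · simp only [hmem, if_false, Bool.false_eq_true]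
      have : String.ofList [c] = String.ofList [pvStepB c] := by
        simpa [pvStepA, hmem] using hc
      rw [this, String.append_assoc]
      congr 1
      rw [← String.toList_inj]
      simp

-- ===== VERDICT (by name: the statement is the Claim_ definition above) =====
theorem tdec_spec : Claim_equal_tdec := by
  intro text _
  unfold Spec_tdec tdec tdec_alt
  simpa using pv_fold (PySem.Str.lower text).toList ""
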